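-- pv_equiv track=rewrite | github.com/Stephen-J-Jones/AdventOfCode | 2023/day03/part2.py | remap_numbers
-- ===== SOURCE A (Python) =====
-- def remap_numbers(numbers):
--     new_numbers = {}
--     for line_index, line_numbers in numbers.items():
--         if not line_numbers:
--             continue
--         new_numbers[line_index] = {}
--         indices = sorted(line_numbers)
--         current_ptr = indices[0]
--         previous_index = indices[0]
--         for col_index in indices:
--             if previous_index - col_index == 0:
--                 new_numbers[line_index][current_ptr] = line_numbers[col_index]
--                 previous_index = col_index
--             elif col_index - previous_index == 1:
--                 new_numbers[line_index][current_ptr] += line_numbers[col_index]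
--                 previous_index = col_index
--             else:
--                 current_ptr = col_index
--                 previous_index = col_index
--                 new_numbers[line_index][current_ptr] = line_numbers[col_index]
--     return new_numbers
-- ===== SOURCE B (Python) =====
-- def remap_numbers(numbers):
--     # Split each line's sorted columns into maximal consecutive runs (recursively),
--     # then emit one (first column, concatenated values) pair per run.
--     return {line_index: dict(_runs(sorted(line_numbers), line_numbers))
--             for line_index, line_numbers in numbers.items() if line_numbers}
--
--
-- def _runs(cols, line_numbers):
--     """cols is a sorted list of column indices; peel off the leading maximal
--     run of consecutive indices, emit its (start, concatenation) pair, recurse."""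
--     if not cols:
--         return []
--     run = [cols[0]]
--     rest = cols[1:]
--     while rest and rest[0] == run[-1] + 1:
--         run.append(rest[0])
--         rest = rest[1:]
--     return [(run[0], "".join(line_numbers[c] for c in run))] + _runs(rest, line_numbers)
-- ===== Notes on version B (the rewrite author's own statement) =====
-- stated objective: simpler
-- what changed: B replaces A's single stateful pointer loop (current_ptr/previous_index with in-place dict mutation and +=) by a recursive decomposition that peels maximal consecutive runs off the sorted column list and emits one (run start, joined values) pair per run.
import Mathlib
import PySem

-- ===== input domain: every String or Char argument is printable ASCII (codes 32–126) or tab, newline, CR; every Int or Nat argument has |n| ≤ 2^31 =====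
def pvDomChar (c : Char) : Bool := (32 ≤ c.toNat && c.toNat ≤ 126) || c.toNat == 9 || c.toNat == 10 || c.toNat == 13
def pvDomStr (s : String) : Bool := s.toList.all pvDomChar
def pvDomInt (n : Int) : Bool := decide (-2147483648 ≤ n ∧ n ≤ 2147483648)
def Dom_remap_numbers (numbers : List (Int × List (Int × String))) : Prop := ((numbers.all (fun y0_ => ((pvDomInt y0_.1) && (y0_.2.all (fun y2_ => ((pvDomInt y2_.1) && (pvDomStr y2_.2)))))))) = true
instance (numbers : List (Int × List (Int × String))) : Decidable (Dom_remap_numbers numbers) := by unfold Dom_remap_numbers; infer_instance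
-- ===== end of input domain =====

-- B first splits each line's sorted columns into maximal consecutive runs (recursive run
-- extraction) instead of A's single stateful pointer loop that mutates the per-line dict
-- as it goes; objective: simpler. Return values proved equal on the whole domain.

-- ===== PORT A =====
-- the body of A's inner 'for col_index in indices' loop; state = (new_numbers[line_index], current_ptr, previous_index).
-- line_numbers[col_index] is ported as ln.getD col "": col always comes from ln's own keys, so KeyError is impossible;
-- new_numbers[line_index][current_ptr] += … is ported as insert of (old value ++ new); current_ptr is always a present key there.
def pvStepA (ln : PySem.Dict Int String) (st : PySem.Dict Int String × Int × Int) (col : Int) :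
    PySem.Dict Int String × Int × Int :=
  if st.2.2 - col = 0 then (st.1.insert st.2.1 (ln.getD col ""), st.2.1, col)
  else if col - st.2.2 = 1 then (st.1.insert st.2.1 (st.1.getD st.2.1 "" ++ ln.getD col ""), st.2.1, col)
  else (st.1.insert col (ln.getD col ""), col, col)

-- 'new_numbers[line_index] = {}' followed by in-place mutation of that entry is ported
-- as one insert of the finished inner dict (same position, same final value).
def remap_numbers (numbers : List (Int × List (Int × String))) : List (Int × List (Int × String)) :=
  (numbers.foldl (fun new_numbers p =>
      if p.2.isEmpty then new_numbers
      else
        let ln := PySem.Dict.ofList p.2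
        let indices := PySem.List.sorted ln.keys (fun k => k)
        match indices with
        | [] => new_numbers  -- unreachable: p.2 ≠ [], so ln has a key (Python's indices[0] never raises)
        | i0 :: rest =>
          new_numbers.insert p.1 (((i0 :: rest).foldl (pvStepA ln) (PySem.Dict.empty, i0, i0)).1.items))
    (PySem.Dict.empty : PySem.Dict Int (List (Int × String)))).items

-- ===== PORT B =====
-- the inner 'while' of _runs: peel the leading maximal consecutive run off a sorted column list
def pvTakeRun (prev : Int) : List Int → List Int × List Int
  | [] => ([], [])
  | c :: cs =>
      if c = prev + 1 then
        let r := pvTakeRun c cs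
        (c :: r.1, r.2)
      else ([], c :: cs)

-- termination measure for pvRuns (cited in its decreasing_by)
lemma pvTakeRun_snd_length_le (prev : Int) (cs : List Int) :
    (pvTakeRun prev cs).2.length ≤ cs.length := by
  induction cs generalizing prev with
  | nil => simp [pvTakeRun]
  | cons c cs ih =>
      simp only [pvTakeRun]
      split
      · exact le_trans (ih c) (Nat.le_succ _)
      · simp

-- _runs: one (run start, "".join of the run's values) pair per maximal run
def pvRuns (ln : PySem.Dict Int String) : List Int → List (Int × String)
  | [] => []
  | c :: cs =>
      let r := pvTakeRun c cs
      (c, PySem.Str.join "" ((c :: r.1).map (fun x => ln.getD x ""))) :: pvRuns ln r.2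
termination_by cols => cols.length
decreasing_by
  simpa using Nat.lt_succ_of_le (pvTakeRun_snd_length_le c cs)

-- dict(_runs(...)): run starts are strictly increasing, hence distinct, so the
-- resulting dict's item list is the pair list itself.
def remap_numbers_alt (numbers : List (Int × List (Int × String))) : List (Int × List (Int × String)) :=
  (numbers.foldl (fun out p =>
      if p.2.isEmpty then out
      else
        let ln := PySem.Dict.ofList p.2
        out.insert p.1 (pvRuns ln (PySem.List.sorted ln.keys (fun k => k))))
    (PySem.Dict.empty : PySem.Dict Int (List (Int × String)))).items

-- ===== PRECONDITION & SPEC =====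
def Spec_remap_numbers (numbers : List (Int × List (Int × String))) (out : List (Int × List (Int × String))) : Prop := out = remap_numbers_alt numbers
instance (numbers : List (Int × List (Int × String))) (out : List (Int × List (Int × String))) : Decidable (Spec_remap_numbers numbers out) := by unfold Spec_remap_numbers; infer_instance

-- ===== CLAIM (what is proved, stated in full; the proofs are below) =====
def Claim_equal_remap_numbers : Prop := ∀ (numbers : List (Int × List (Int × String))), Dom_remap_numbers numbers → Spec_remap_numbers numbers (remap_numbers numbers)

-- ===== LEMMAS AND PROOFS =====

lemma strJoin_cons (x : String) (xs : List String) :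
    PySem.Str.join "" (x :: xs) = x ++ PySem.Str.join "" xs := by
  cases xs with
  | nil => simp [PySem.Str.join, PySem.Chars.join, List.intercalate, String.ofList_toList,
      String.append_empty]
  | cons y ys =>
      simp [PySem.Str.join, PySem.Chars.join, List.intercalate, String.ofList_toList]

lemma strJoin_nil : PySem.Str.join "" ([] : List String) = "" := by
  simp [PySem.Str.join, PySem.Chars.join, List.intercalate]

lemma not_fst_contains (e : List (Int × String)) (k : Int) (h : k ∉ e.map Prod.fst) :
    (PySem.Dict.mk e).contains k = false := by
  rw [← Bool.not_eq_true, PySem.Dict.contains_iff_mem_keys]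
  simpa [PySem.Dict.keys] using h

-- inserting a fresh key appends
lemma dict_insert_fresh (e : List (Int × String)) (k : Int) (x : String)
    (h : k ∉ e.map Prod.fst) :
    (PySem.Dict.mk e).insert k x = PySem.Dict.mk (e ++ [(k, x)]) :=
  PySem.Dict.ext (PySem.Dict.items_insert_of_not_contains _ x (not_fst_contains e k h))

-- overwriting the last entry of a dict whose earlier keys differ
lemma dict_insert_last (e : List (Int × String)) (cur : Int) (s x : String)
    (h : cur ∉ e.map Prod.fst) :
    (PySem.Dict.mk (e ++ [(cur, s)])).insert cur x = PySem.Dict.mk (e ++ [(cur, x)]) := by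
  apply PySem.Dict.ext
  have hc : (PySem.Dict.mk (e ++ [(cur, s)])).contains cur = true := by
    rw [PySem.Dict.contains_iff_mem_keys]
    simp [PySem.Dict.keys]
  refine (PySem.Dict.items_insert_of_contains _ x hc).trans ?_
  show (e ++ [(cur, s)]).map _ = _
  rw [List.map_append]
  congr 1
  · refine (List.map_congr_left ?_).trans (List.map_id e)
    intro p hp
    have : p.1 ≠ cur := fun hcc => h (hcc ▸ List.mem_map_of_mem hp)
    simp [this]
  · simp

lemma dict_getD_last (e : List (Int × String)) (cur : Int) (s : String)
    (h : cur ∉ e.map Prod.fst) :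
    (PySem.Dict.mk (e ++ [(cur, s)])).getD cur "" = s := by
  induction e with
  | nil => simp [PySem.Dict.getD_eq_get?_getD, PySem.Dict.get?_mk_cons]
  | cons p e ih =>
      have h1 : (p.1 == cur) = false := by
        simp only [beq_eq_false_iff_ne, ne_eq]
        exact fun hc => h (List.mem_cons.mpr (Or.inl hc.symm)) |>.elim
      have h2 : cur ∉ e.map Prod.fst := fun hc => h (List.mem_cons_of_mem _ hc)
      rw [PySem.Dict.getD_eq_get?_getD] at ih ⊢
      rw [List.cons_append, PySem.Dict.get?_mk_cons, h1]
      simpa using ih h2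

-- the heart: A's stateful pointer loop computes B's run decomposition.
-- e = the finished earlier runs, (cur, s) = the run being grown, prev = last column seen.
lemma stepA_loop (ln : PySem.Dict Int String) (cs : List Int) :
    ∀ (e : List (Int × String)) (cur : Int) (s : String) (prev : Int),
      (∀ k ∈ e.map Prod.fst, k ≤ prev) → cur ≤ prev → cur ∉ e.map Prod.fst →
      (prev :: cs).Pairwise (· < ·) →
      ((cs.foldl (pvStepA ln) (PySem.Dict.mk (e ++ [(cur, s)]), cur, prev)).1).items
        = e ++ [(cur, s ++ PySem.Str.join "" ((pvTakeRun prev cs).1.map (fun c => ln.getD c "")))]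
          ++ pvRuns ln (pvTakeRun prev cs).2 := by
  induction cs with
  | nil =>
      intro e cur s prev _ _ _ _
      simp [pvTakeRun, pvRuns, strJoin_nil, String.append_empty]
  | cons c cs ih =>
      intro e cur s prev hle hcur hnin hpw
      have hpc : prev < c := (List.pairwise_cons.mp hpw).1 c (List.mem_cons_self)
      have hpw' : (c :: cs).Pairwise (· < ·) := (List.pairwise_cons.mp hpw).2
      rw [List.foldl_cons]
      by_cases hc1 : c = prev + 1
      · -- consecutive column: the loop takes the '+=' branch, extending the current run
        have hstep : pvStepA ln (PySem.Dict.mk (e ++ [(cur, s)]), cur, prev) c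
            = (PySem.Dict.mk (e ++ [(cur, s ++ ln.getD c "")]), cur, c) := by
          simp only [pvStepA]
          rw [if_neg (by omega), if_pos (by omega)]
          rw [dict_getD_last e cur s hnin, dict_insert_last e cur s _ hnin]
        rw [hstep]
        rw [ih e cur (s ++ ln.getD c "") c
          (fun k hk => le_of_lt (lt_of_le_of_lt (hle k hk) hpc))
          (le_of_lt (lt_of_le_of_lt hcur hpc)) hnin hpw']
        rw [show pvTakeRun prev (c :: cs) = (c :: (pvTakeRun c cs).1, (pvTakeRun c cs).2) by
          simp [pvTakeRun, hc1]]
        simp only [List.map_cons, strJoin_cons, String.append_assoc]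
      · -- gap: the loop resets current_ptr, starting a new run at c
        have hfresh : c ∉ (e ++ [(cur, s)]).map Prod.fst := by
          simp only [List.map_append, List.mem_append, List.map_cons, List.map_nil,
            List.mem_singleton]
          rintro (hc | hc)
          · exact absurd (hle c hc) (by omega)
          · exact absurd hc (by omega)
        have hstep : pvStepA ln (PySem.Dict.mk (e ++ [(cur, s)]), cur, prev) c
            = (PySem.Dict.mk ((e ++ [(cur, s)]) ++ [(c, ln.getD c "")]), c, c) := by
          simp only [pvStepA]
          rw [if_neg (by omega), if_neg (by omega)]
          rw [dict_insert_fresh _ c _ hfresh]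
        rw [hstep]
        rw [ih (e ++ [(cur, s)]) c (ln.getD c "") c
          (by
            intro k hk
            simp only [List.map_append, List.mem_append, List.map_cons, List.map_nil,
              List.mem_singleton] at hk
            rcases hk with hk | hk
            · exact le_of_lt (lt_of_le_of_lt (hle k hk) hpc)
            · exact le_of_lt (by omega))
          le_rfl hfresh hpw']
        rw [show pvTakeRun prev (c :: cs) = ([], c :: cs) by simp [pvTakeRun, hc1]]
        show _ = e ++ [(cur, s ++ PySem.Str.join "" [])] ++ pvRuns ln (c :: cs)
        rw [strJoin_nil, String.append_empty, pvRuns]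
        simp only [List.map_cons, strJoin_cons, List.append_assoc, List.cons_append,
          List.nil_append]

lemma keys_ofList' (l : List (Int × String)) :
    (PySem.Dict.ofList l).keys = PySem.Set.ofList (l.map Prod.fst) := by
  show (l.foldl (fun d p => d.insert p.1 p.2) PySem.Dict.empty).keys = _
  rw [PySem.Dict.keys_foldl_insert_key]
  rfl

-- one full line: A's inner loop (first iteration sets d[i0], the rest run stepA_loop) = B's pvRuns
lemma line_eq (ln : PySem.Dict Int String) (i0 : Int) (rest : List Int)
    (hpw : (i0 :: rest).Pairwise (· < ·)) :
    ((i0 :: rest).foldl (pvStepA ln) (PySem.Dict.empty, i0, i0)).1.items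
      = pvRuns ln (i0 :: rest) := by
  rw [List.foldl_cons]
  have hstep : pvStepA ln (PySem.Dict.empty, i0, i0) i0
      = (PySem.Dict.mk ([] ++ [(i0, ln.getD i0 "")]), i0, i0) := by
    simp only [pvStepA]
    rw [if_pos (by omega)]
    rw [show (PySem.Dict.empty : PySem.Dict Int String) = PySem.Dict.mk [] from rfl,
      dict_insert_fresh [] i0 _ (by simp)]
  rw [hstep, stepA_loop ln rest [] i0 (ln.getD i0 "") i0 (by simp) le_rfl (by simp) hpw]
  rw [pvRuns]
  simp only [List.map_cons, strJoin_cons, List.nil_append, List.singleton_append]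

lemma sorted_keys_pairwise_lt (l : List (Int × String)) :
    (PySem.List.sorted (PySem.Dict.ofList l).keys (fun k => k)).Pairwise (· < ·) := by
  have hle := PySem.List.sorted_pairwise (PySem.Dict.ofList l).keys (fun k => k)
  have hnd : (PySem.List.sorted (PySem.Dict.ofList l).keys (fun k => k)).Nodup :=
    (PySem.List.sorted_perm _ _ _).symm.nodup (PySem.Dict.nodup_keys_ofList l)
  exact (hle.and hnd).imp (fun h => lt_of_le_of_ne h.1 h.2)

-- ===== VERDICT (by name: the statement is the Claim_ definition above) =====
theorem remap_numbers_spec : Claim_equal_remap_numbers := by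
  intro numbers _
  unfold Spec_remap_numbers remap_numbers remap_numbers_alt
  apply congrArg PySem.Dict.items
  apply PySem.List.foldl_congr_mem
  intro out p _
  by_cases hp : p.2.isEmpty = true
  · rw [if_pos hp, if_pos hp]
  · rw [if_neg hp, if_neg hp]
    show (match PySem.List.sorted (PySem.Dict.ofList p.2).keys (fun k => k) with
      | [] => out
      | i0 :: rest =>
        out.insert p.1 (((i0 :: rest).foldl (pvStepA (PySem.Dict.ofList p.2))
          (PySem.Dict.empty, i0, i0)).1.items))
      = out.insert p.1 (pvRuns (PySem.Dict.ofList p.2)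
          (PySem.List.sorted (PySem.Dict.ofList p.2).keys (fun k => k)))
    have hpw := sorted_keys_pairwise_lt p.2
    cases hs : PySem.List.sorted (PySem.Dict.ofList p.2).keys (fun k => k) with
    | nil =>
        exfalso
        have hkeys : (PySem.Dict.ofList p.2).keys = [] :=
          ((PySem.List.sorted_eq_nil_iff _ _ _).mp hs)
        rw [keys_ofList'] at hkeys
        cases hl : p.2 with
        | nil => rw [hl] at hp; simp at hp
        | cons q l =>
            rw [hl] at hkeys
            rw [List.map_cons, PySem.Set.ofList_cons] at hkeys
            exact List.cons_ne_nil _ _ hkeys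
    | cons i0 rest =>
        rw [hs] at hpw
        exact congrArg (out.insert p.1) (line_eq (PySem.Dict.ofList p.2) i0 rest hpw)
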